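-- pv_equiv track=rewrite | github.com/CodingThrust/problem-reductions | docs/paper/verify-reductions/verify_k_satisfiability_register_sufficiency.py | is_valid_target
-- ===== SOURCE A (Python) =====
-- def is_valid_target(num_vertices: int, arcs: list[tuple[int, int]],
--                     bound: int) -> bool:
--     """Validate a Register Sufficiency instance."""
--     if num_vertices < 0 or bound < 0:
--         return False
--     for v, u in arcs:
--         if v < 0 or v >= num_vertices or u < 0 or u >= num_vertices:
--             return False
--         if v == u:
--             return False
--     # Check acyclicity
--     in_deg = [0] * num_vertices
--     adj: list[list[int]] = [[] for _ in range(num_vertices)]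
--     for v, u in arcs:
--         adj[u].append(v)
--         in_deg[v] += 1
--     queue = [v for v in range(num_vertices) if in_deg[v] == 0]
--     visited = 0
--     while queue:
--         node = queue.pop()
--         visited += 1
--         for nb in adj[node]:
--             in_deg[nb] -= 1
--             if in_deg[nb] == 0:
--                 queue.append(nb)
--     return visited == num_vertices
-- ===== SOURCE B (Python) =====
-- def is_valid_target(num_vertices: int, arcs: list[tuple[int, int]],
--                     bound: int) -> bool:
--     """Validate a Register Sufficiency instance."""
--     if num_vertices < 0 or bound < 0:
--         return False
--     for v, u in arcs:
--         if v < 0 or v >= num_vertices or u < 0 or u >= num_vertices: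
--             return False
--         if v == u:
--             return False
--     # Acyclicity by boolean relaxation to a fixed point: a vertex becomes
--     # "ready" once all vertices it must wait for (all u with (v, u) in arcs)
--     # are ready; the instance is acyclic iff every vertex becomes ready.
--     preds: list[list[int]] = [[] for _ in range(num_vertices)]
--     for v, u in arcs:
--         preds[v].append(u)
--     ready = [False] * num_vertices
--     for _ in range(num_vertices):
--         changed = False
--         for v in range(num_vertices):
--             if not ready[v] and all(ready[u] for u in preds[v]):
--                 ready[v] = True
--                 changed = True
--         if not changed:
--             break
--     return all(ready)
-- ===== Notes on version B (the rewrite author's own statement) =====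
-- stated objective: alternative
-- what changed: The in-degree counters, the explicit worklist/stack and the decrement-and-enqueue mechanics of Kahn's algorithm are replaced by a boolean relaxation: repeatedly sweep the vertices marking each one ready once all vertices it waits for are ready, stopping when a sweep changes nothing; the instance is valid iff every vertex becomes ready.
import Mathlib
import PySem

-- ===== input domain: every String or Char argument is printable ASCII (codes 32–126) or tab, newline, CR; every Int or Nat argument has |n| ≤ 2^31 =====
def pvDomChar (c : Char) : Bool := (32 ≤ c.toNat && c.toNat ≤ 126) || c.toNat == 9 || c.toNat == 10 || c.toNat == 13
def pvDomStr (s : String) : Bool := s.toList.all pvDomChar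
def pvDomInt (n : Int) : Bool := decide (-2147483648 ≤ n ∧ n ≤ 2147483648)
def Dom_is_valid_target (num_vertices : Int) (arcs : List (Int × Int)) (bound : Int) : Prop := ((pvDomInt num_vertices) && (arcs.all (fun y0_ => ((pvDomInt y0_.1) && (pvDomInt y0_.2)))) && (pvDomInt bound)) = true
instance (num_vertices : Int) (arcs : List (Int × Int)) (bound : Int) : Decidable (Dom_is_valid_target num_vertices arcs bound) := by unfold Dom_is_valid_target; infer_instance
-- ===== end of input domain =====

-- B replaces Kahn's in-degree worklist by a boolean relaxation to a fixed point
-- (repeated "a vertex is ready once all its predecessors are ready" passes);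
-- objective: alternative (same answers, no counters/queue; not claimed faster).

-- ===== PORT A =====
def pvBadArc (num_vertices : Int) (p : Int × Int) : Bool :=
  decide (p.1 < 0) || decide (p.1 ≥ num_vertices) || decide (p.2 < 0) ||
    decide (p.2 ≥ num_vertices) || decide (p.1 = p.2)

def pvIncr (d : List Int) (i : Nat) : List Int := d.set i (d.getD i 0 + 1)

def pvPush (a : List (List Nat)) (i : Nat) (x : Nat) : List (List Nat) :=
  a.set i (a.getD i [] ++ [x])

-- Python's `while queue:`; fuel n+1 is enough because each vertex is enqueued at most once.
def pvKahnLoop (adj : List (List Nat)) : Nat → List Int → List Nat → Nat → Nat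
  | 0, _, _, vis => vis
  | fuel+1, deg, queue, vis =>
    match queue.getLast? with        -- queue.pop() pops the LAST element
    | none => vis
    | some node =>
      let s := (adj.getD node []).foldl
        (fun (s : List Int × List Nat) nb =>
          let d := s.1.set nb (s.1.getD nb 0 - 1)
          if d.getD nb 0 == 0 then (d, s.2 ++ [nb]) else (d, s.2))
        (deg, queue.dropLast)
      pvKahnLoop adj fuel s.1 s.2 (vis + 1)

def is_valid_target (num_vertices : Int) (arcs : List (Int × Int)) (bound : Int) : Bool :=
  if num_vertices < 0 || bound < 0 then false
  else if arcs.any (pvBadArc num_vertices) then false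
  else
    let n := num_vertices.toNat
    let narcs := arcs.map (fun p => (p.1.toNat, p.2.toNat))
    let deg := narcs.foldl (fun d p => pvIncr d p.1) (List.replicate n 0)
    let adj := narcs.foldl (fun a p => pvPush a p.2 p.1) (List.replicate n [])
    let queue := (List.range n).filter (fun v => deg.getD v 0 == 0)
    pvKahnLoop adj (n + 1) deg queue 0 == n

-- ===== PORT B =====
def pvPassF (preds : List (List Nat)) (s : List Bool × Bool) (v : Nat) : List Bool × Bool :=
  if !(s.1.getD v false) && (preds.getD v []).all (fun u => s.1.getD u false) then
    (s.1.set v true, true)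
  else s

def pvRelax (preds : List (List Nat)) (n : Nat) : Nat → List Bool → List Bool
  | 0, r => r
  | k+1, r =>
    let p := (List.range n).foldl (pvPassF preds) (r, false)
    if p.2 then pvRelax preds n k p.1 else p.1   -- `break` when a pass changes nothing

def is_valid_target_alt (num_vertices : Int) (arcs : List (Int × Int)) (bound : Int) : Bool :=
  if num_vertices < 0 || bound < 0 then false
  else if arcs.any (pvBadArc num_vertices) then false
  else
    let n := num_vertices.toNat
    let narcs := arcs.map (fun p => (p.1.toNat, p.2.toNat))
    let preds := narcs.foldl (fun a p => pvPush a p.1 p.2) (List.replicate n [])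
    (pvRelax preds n n (List.replicate n false)).all (fun b => b)

-- ===== PRECONDITION & SPEC =====
def Spec_is_valid_target (num_vertices : Int) (arcs : List (Int × Int)) (bound : Int) (out : Bool) : Prop := out = is_valid_target_alt num_vertices arcs bound
instance (num_vertices : Int) (arcs : List (Int × Int)) (bound : Int) (out : Bool) : Decidable (Spec_is_valid_target num_vertices arcs bound out) := by unfold Spec_is_valid_target; infer_instance

-- ===== CLAIM (what is proved, stated in full; the proofs are below) =====
def Claim_equal_is_valid_target : Prop := ∀ (num_vertices : Int) (arcs : List (Int × Int)) (bound : Int), Dom_is_valid_target num_vertices arcs bound → Spec_is_valid_target num_vertices arcs bound (is_valid_target num_vertices arcs bound)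

-- ===== LEMMAS AND PROOFS =====

-- Predecessor multiset of v: the u's with (v, u) an arc (as Nat pairs).
def pvPd (narcs : List (Nat × Nat)) (v : Nat) : List Nat :=
  (narcs.filter (fun p => p.1 == v)).map (fun p => p.2)

-- One step of the "ready" operator: vertices all of whose predecessors are in S.
def pvF (n : Nat) (narcs : List (Nat × Nat)) (S : Finset Nat) : Finset Nat :=
  (Finset.range n).filter (fun v => ∀ u ∈ pvPd narcs v, u ∈ S)

-- Its least fixed point, reached within n iterations.
def pvL (n : Nat) (narcs : List (Nat × Nat)) : Finset Nat := (pvF n narcs)^[n] ∅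

theorem pvF_mono (n : Nat) (narcs : List (Nat × Nat)) {S T : Finset Nat} (h : S ⊆ T) :
    pvF n narcs S ⊆ pvF n narcs T := by
  intro v hv
  simp only [pvF, Finset.mem_filter] at hv ⊢
  exact ⟨hv.1, fun u hu => h (hv.2 u hu)⟩

theorem pvF_subset_range (n : Nat) (narcs : List (Nat × Nat)) (S : Finset Nat) :
    pvF n narcs S ⊆ Finset.range n := by
  intro v hv; exact (Finset.mem_filter.mp hv).1

theorem pvL_subset_range (n : Nat) (narcs : List (Nat × Nat)) :
    pvL n narcs ⊆ Finset.range n := by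
  cases n with
  | zero => simp [pvL]
  | succ m =>
    have : (pvF (m+1) narcs)^[m+1] ∅ = pvF (m+1) narcs ((pvF (m+1) narcs)^[m] ∅) :=
      Function.iterate_succ_apply' _ _ _
    rw [pvL, this]
    exact pvF_subset_range _ _ _

theorem pvF_iter_mono (n : Nat) (narcs : List (Nat × Nat)) (k : Nat) :
    (pvF n narcs)^[k] ∅ ⊆ (pvF n narcs)^[k+1] ∅ := by
  induction k with
  | zero => simp
  | succ m ih =>
    rw [Function.iterate_succ_apply', Function.iterate_succ_apply']
    exact pvF_mono n narcs ih

theorem pvL_closed (n : Nat) (narcs : List (Nat × Nat)) :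
    pvF n narcs (pvL n narcs) ⊆ pvL n narcs := by
  by_cases h : ∃ k < n, (pvF n narcs)^[k+1] ∅ = (pvF n narcs)^[k] ∅
  · obtain ⟨k, hk, heq⟩ := h
    have stab : ∀ j, (pvF n narcs)^[k + j] ∅ = (pvF n narcs)^[k] ∅ := by
      intro j
      induction j with
      | zero => rfl
      | succ m ih =>
        have e1 : k + (m + 1) = (k + m) + 1 := by omega
        calc (pvF n narcs)^[k + (m+1)] ∅ = (pvF n narcs)^[(k+m)+1] ∅ := by rw [e1]
          _ = pvF n narcs ((pvF n narcs)^[k+m] ∅) := Function.iterate_succ_apply' _ _ _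
          _ = pvF n narcs ((pvF n narcs)^[k] ∅) := by rw [ih]
          _ = (pvF n narcs)^[k+1] ∅ := (Function.iterate_succ_apply' _ _ _).symm
          _ = (pvF n narcs)^[k] ∅ := heq
    have hLn : pvL n narcs = (pvF n narcs)^[k] ∅ := by
      have hn : (pvF n narcs)^[n] ∅ = (pvF n narcs)^[k + (n - k)] ∅ := by
        congr 1; omega
      rw [pvL, hn, stab]
    rw [hLn]
    have h2 : pvF n narcs ((pvF n narcs)^[k] ∅) = (pvF n narcs)^[k+1] ∅ :=
      (Function.iterate_succ_apply' _ _ _).symm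
    rw [h2, heq]
  · push Not at h
    have grow : ∀ k, k ≤ n → k ≤ ((pvF n narcs)^[k] ∅).card := by
      intro k
      induction k with
      | zero => intro _; simp
      | succ m ih =>
        intro hm
        have h1 := ih (by omega)
        have hss : (pvF n narcs)^[m] ∅ ⊂ (pvF n narcs)^[m+1] ∅ :=
          ⟨pvF_iter_mono n narcs m, fun hsub => h m (by omega)
            (Finset.Subset.antisymm hsub (pvF_iter_mono n narcs m))⟩
        have := Finset.card_lt_card hss
        omega
    have hcard : n ≤ (pvL n narcs).card := grow n (le_refl n)
    have heq : pvL n narcs = Finset.range n :=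
      Finset.eq_of_subset_of_card_le (pvL_subset_range n narcs)
        (by simpa using hcard)
    rw [heq]
    intro v hv
    exact Finset.mem_range.mpr (Finset.mem_range.mp (pvF_subset_range n narcs _ hv))

theorem pvL_least (n : Nat) (narcs : List (Nat × Nat)) {S : Finset Nat}
    (h : pvF n narcs S ⊆ S) : pvL n narcs ⊆ S := by
  have : ∀ k, (pvF n narcs)^[k] ∅ ⊆ S := by
    intro k
    induction k with
    | zero => simp
    | succ m ih =>
      rw [Function.iterate_succ_apply']
      exact fun v hv => h (pvF_mono n narcs ih hv)
  exact this n

theorem pvL_mem (n : Nat) (narcs : List (Nat × Nat)) {v : Nat} (hv : v < n)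
    (h : ∀ u ∈ pvPd narcs v, u ∈ pvL n narcs) : v ∈ pvL n narcs := by
  apply pvL_closed
  simp only [pvF, Finset.mem_filter, Finset.mem_range]
  exact ⟨hv, h⟩


theorem pv_getD_set_self {α : Type} (l : List α) (i : Nat) (a d : α) (h : i < l.length) :
    (l.set i a).getD i d = a := by
  simp [List.getD, h]

theorem pv_getD_set_ne {α : Type} (l : List α) (i j : Nat) (a d : α) (h : i ≠ j) :
    (l.set i a).getD j d = l.getD j d := by
  simp [List.getD, h]

theorem pvPush_build (key val : Nat × Nat → Nat) :
    ∀ (as : List (Nat × Nat)) (acc : List (List Nat)),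
      (∀ p ∈ as, key p < acc.length) →
      (as.foldl (fun a p => pvPush a (key p) (val p)) acc).length = acc.length ∧
      ∀ u, (as.foldl (fun a p => pvPush a (key p) (val p)) acc).getD u [] =
        acc.getD u [] ++ (as.filter (fun p => key p == u)).map val := by
  intro as
  induction as with
  | nil => intro acc _; exact ⟨rfl, fun u => by simp⟩
  | cons p as' ih =>
    intro acc hk
    have hlen : (pvPush acc (key p) (val p)).length = acc.length := by
      simp [pvPush]
    obtain ⟨ih1, ih2⟩ := ih (pvPush acc (key p) (val p))
      (fun q hq => by rw [hlen]; exact hk q (List.mem_cons_of_mem _ hq))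
    refine ⟨by simp [List.foldl_cons, ih1, hlen], fun u => ?_⟩
    rw [List.foldl_cons, ih2 u]
    by_cases hu : key p = u
    · rw [show pvPush acc (key p) (val p)
          = acc.set (key p) (acc.getD (key p) [] ++ [val p]) from rfl]
      rw [hu]
      rw [pv_getD_set_self _ _ _ _ (hu ▸ hk p (List.mem_cons_self))]
      simp [hu]
    · rw [show pvPush acc (key p) (val p)
          = acc.set (key p) (acc.getD (key p) [] ++ [val p]) from rfl]
      rw [pv_getD_set_ne _ _ _ _ _ hu]
      simp [hu]

theorem pvIncr_build :
    ∀ (as : List (Nat × Nat)) (acc : List Int),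
      (∀ p ∈ as, p.1 < acc.length) →
      (as.foldl (fun d p => pvIncr d p.1) acc).length = acc.length ∧
      ∀ v, (as.foldl (fun d p => pvIncr d p.1) acc).getD v 0 =
        acc.getD v 0 + ((as.filter (fun p => p.1 == v)).length : Int) := by
  intro as
  induction as with
  | nil => intro acc _; exact ⟨rfl, fun v => by simp⟩
  | cons p as' ih =>
    intro acc hk
    have hlen : (pvIncr acc p.1).length = acc.length := by simp [pvIncr]
    obtain ⟨ih1, ih2⟩ := ih (pvIncr acc p.1)
      (fun q hq => by rw [hlen]; exact hk q (List.mem_cons_of_mem _ hq))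
    refine ⟨by simp [List.foldl_cons, ih1, hlen], fun v => ?_⟩
    rw [List.foldl_cons, ih2 v]
    by_cases hv : p.1 = v
    · rw [show pvIncr acc p.1 = acc.set p.1 (acc.getD p.1 0 + 1) from rfl]
      rw [hv]
      rw [pv_getD_set_self _ _ _ _ (hv ▸ hk p (List.mem_cons_self))]
      simp [hv]
      ring
    · rw [show pvIncr acc p.1 = acc.set p.1 (acc.getD p.1 0 + 1) from rfl]
      rw [pv_getD_set_ne _ _ _ _ _ hv]
      simp [hv]

theorem pv_count_occ (narcs : List (Nat × Nat)) (node v : Nat) :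
    ((narcs.filter (fun p => p.2 == node)).map (fun p => p.1)).count v
      = (pvPd narcs v).count node := by
  unfold pvPd
  rw [List.count_eq_countP, List.count_eq_countP, List.countP_map, List.countP_map,
    List.countP_filter, List.countP_filter]
  apply List.countP_congr
  intro p _
  simp [Function.comp]
  tauto

theorem pv_filter_insert (P : Finset Nat) (node : Nat) (hnode : node ∉ P) :
    ∀ (m : List Nat),
      (m.filter (fun u => decide (u ∉ P))).length
        = (m.filter (fun u => decide (u ∉ insert node P))).length + m.count node := by
  intro m
  induction m with
  | nil => simp
  | cons u m' ih =>
    rw [List.filter_cons, List.filter_cons, List.count_cons]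
    by_cases hu : u = node
    · subst hu
      rw [if_pos (show decide (u ∉ P) = true by simpa using hnode),
        if_neg (show ¬ decide (u ∉ insert u P) = true by simp),
        if_pos (show (u == u) = true by simp)]
      simp only [List.length_cons]
      omega
    · have h2 : decide (u ∉ insert node P) = decide (u ∉ P) := by
        simp [Finset.mem_insert, hu]
      have h3 : (u == node) = false := by simpa using hu
      rw [h2, h3, if_neg (show ¬ (false = true) by simp)]
      by_cases h : u ∉ P
      · rw [if_pos (show decide (u ∉ P) = true by simpa using h),
          if_pos (show decide (u ∉ P) = true by simpa using h)]
        simp only [List.length_cons]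
        omega
      · rw [if_neg (show ¬ decide (u ∉ P) = true by simpa using h),
          if_neg (show ¬ decide (u ∉ P) = true by simpa using h)]
        omega


-- The body of A's inner decrement-and-maybe-enqueue fold (same lambda as in the port).
def pvStep (s : List Int × List Nat) (nb : Nat) : List Int × List Nat :=
  if (s.1.set nb (s.1.getD nb 0 - 1)).getD nb 0 == 0 then
    (s.1.set nb (s.1.getD nb 0 - 1), s.2 ++ [nb])
  else (s.1.set nb (s.1.getD nb 0 - 1), s.2)

-- Invariant of A's outer while-loop (P = set of already-popped vertices).
structure pvKInv (n : Nat) (narcs : List (Nat × Nat)) (deg : List Int) (queue : List Nat)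
    (P : Finset Nat) : Prop where
  len : deg.length = n
  nod : queue.Nodup
  qlt : ∀ x ∈ queue, x < n
  qP : ∀ x ∈ queue, x ∉ P
  Psub : P ⊆ Finset.range n
  PsubL : P ⊆ pvL n narcs
  Pcl : ∀ v ∈ P, ∀ u ∈ pvPd narcs v, u ∈ P
  dspec : ∀ v, v < n →
    deg.getD v 0 = (((pvPd narcs v).filter (fun u => decide (u ∉ P))).length : Int)
  qiff : ∀ v, v < n → v ∉ P → (v ∈ queue ↔ ∀ u ∈ pvPd narcs v, u ∈ P)

-- Invariant of the inner fold, l = still-unprocessed suffix of adj[node].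
structure pvSInv (n : Nat) (narcs : List (Nat × Nat)) (P' : Finset Nat) (l : List Nat)
    (deg : List Int) (queue : List Nat) : Prop where
  len : deg.length = n
  nod : queue.Nodup
  qlt : ∀ x ∈ queue, x < n
  qP : ∀ x ∈ queue, x ∉ P'
  dspec : ∀ v, v < n → deg.getD v 0
      = (((pvPd narcs v).filter (fun u => decide (u ∉ P'))).length : Int) + l.count v
  qiff : ∀ v, v < n → v ∉ P' →
    (v ∈ queue ↔ ((∀ u ∈ pvPd narcs v, u ∈ P') ∧ l.count v = 0))

theorem pv_filter_len_zero {P : Finset Nat} {m : List Nat}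
    (h : (m.filter (fun u => decide (u ∉ P))).length = 0) : ∀ u ∈ m, u ∈ P := by
  intro u hu
  by_contra hc
  have : u ∈ m.filter (fun u => decide (u ∉ P)) := List.mem_filter.mpr ⟨hu, by simpa using hc⟩
  have := List.length_pos_of_mem this
  omega

theorem pv_all_filter_len_zero {P : Finset Nat} {m : List Nat}
    (h : ∀ u ∈ m, u ∈ P) : (m.filter (fun u => decide (u ∉ P))).length = 0 := by
  have he : m.filter (fun u => decide (u ∉ P)) = [] := by
    rw [List.filter_eq_nil_iff]
    intro a ha
    simpa using h a ha
  rw [he]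
  rfl

theorem pvFold_inv (n : Nat) (narcs : List (Nat × Nat)) (P' : Finset Nat) :
    ∀ (l : List Nat) (deg : List Int) (queue : List Nat),
      (∀ x ∈ l, x < n ∧ x ∉ P') →
      pvSInv n narcs P' l deg queue →
      pvSInv n narcs P' [] (List.foldl pvStep (deg, queue) l).1
        (List.foldl pvStep (deg, queue) l).2 := by
  intro l
  induction l with
  | nil => intro deg queue _ hI; exact hI
  | cons x l' ih =>
    intro deg queue hl hI
    obtain ⟨hxn, hxP⟩ := hl x (List.mem_cons_self)
    have hlt : x < deg.length := by rw [hI.len]; exact hxn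
    set d := deg.set x (deg.getD x 0 - 1) with hd
    have hdx : d.getD x 0 = deg.getD x 0 - 1 := pv_getD_set_self _ _ _ _ hlt
    have hdne : ∀ v, v ≠ x → d.getD v 0 = deg.getD v 0 := fun v hv =>
      pv_getD_set_ne _ _ _ _ _ (fun h => hv h.symm)
    have hcx : (x :: l').count x = l'.count x + 1 := by simp
    have hcne : ∀ v, v ≠ x → (x :: l').count v = l'.count v := by
      intro v hv; simp [List.count_cons]
      omega
    have hdx2 : d.getD x 0
        = (((pvPd narcs x).filter (fun u => decide (u ∉ P'))).length : Int) + l'.count x := by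
      rw [hdx, hI.dspec x hxn, hcx]; push_cast; ring
    have hxq : x ∉ queue := by
      intro hmem
      have := (hI.qiff x hxn hxP).mp hmem
      omega
    have hdlen : d.length = n := by rw [hd, List.length_set, hI.len]
    have hdspec : ∀ v, v < n → d.getD v 0
        = (((pvPd narcs v).filter (fun u => decide (u ∉ P'))).length : Int) + l'.count v := by
      intro v hv
      by_cases hvx : v = x
      · subst hvx; exact hdx2
      · rw [hdne v hvx, hI.dspec v hv, hcne v hvx]
    have hstep : List.foldl pvStep (deg, queue) (x :: l')
        = List.foldl pvStep (pvStep (deg, queue) x) l' := rfl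
    by_cases hz : d.getD x 0 = 0
    · -- x is enqueued
      have hzz : ((pvPd narcs x).filter (fun u => decide (u ∉ P'))).length = 0
          ∧ l'.count x = 0 := by
        rw [hdx2] at hz; omega
      have hsx : pvStep (deg, queue) x = (d, queue ++ [x]) := by
        have hb : (d.getD x 0 == 0) = true := by simpa using hz
        show (if d.getD x 0 == 0 then (d, queue ++ [x]) else (d, queue)) = (d, queue ++ [x])
        rw [hb]
        simp
      rw [hstep, hsx]
      apply ih d (queue ++ [x]) (fun y hy => hl y (List.mem_cons_of_mem _ hy))
      refine ⟨hdlen, ?_, ?_, ?_, hdspec, ?_⟩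
      · simp [List.nodup_append, hI.nod]
        intro a ha hax
        exact hxq (hax ▸ ha)
      · intro y hy
        rcases List.mem_append.mp hy with h | h
        · exact hI.qlt y h
        · simp at h; subst h; exact hxn
      · intro y hy
        rcases List.mem_append.mp hy with h | h
        · exact hI.qP y h
        · simp at h; subst h; exact hxP
      · intro v hv hvP
        by_cases hvx : v = x
        · subst hvx
          constructor
          · intro _; exact ⟨pv_filter_len_zero hzz.1, hzz.2⟩
          · intro _; simp
        · have : v ∈ queue ++ [x] ↔ v ∈ queue := by simp [hvx]
          rw [this, hI.qiff v hv hvP, hcne v hvx]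
    · -- no enqueue
      have hsx : pvStep (deg, queue) x = (d, queue) := by
        have hb : (d.getD x 0 == 0) = false := by simpa using hz
        show (if d.getD x 0 == 0 then (d, queue ++ [x]) else (d, queue)) = (d, queue)
        rw [hb]
        simp
      rw [hstep, hsx]
      apply ih d queue (fun y hy => hl y (List.mem_cons_of_mem _ hy))
      refine ⟨hdlen, hI.nod, hI.qlt, hI.qP, hdspec, ?_⟩
      intro v hv hvP
      by_cases hvx : v = x
      · subst hvx
        constructor
        · intro hmem; exact absurd hmem hxq
        · rintro ⟨hall, hcnt⟩
          exfalso
          have := pv_all_filter_len_zero hall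
          rw [hdx2] at hz
          omega
      · rw [hI.qiff v hv hvP, hcne v hvx]

theorem pvKahn_main (n : Nat) (narcs : List (Nat × Nat)) (adj : List (List Nat))
    (Ha : ∀ p ∈ narcs, p.1 < n ∧ p.2 < n ∧ p.1 ≠ p.2)
    (Hadj : ∀ u, u < n →
      adj.getD u [] = (narcs.filter (fun p => p.2 == u)).map (fun p => p.1)) :
    ∀ (fuel : Nat) (deg : List Int) (queue : List Nat) (P : Finset Nat),
      pvKInv n narcs deg queue P → n ≤ fuel + P.card →
      pvKahnLoop adj fuel deg queue P.card = (pvL n narcs).card := by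
  intro fuel
  induction fuel with
  | zero =>
    intro deg queue P hI hf
    have hP : P = Finset.range n :=
      Finset.eq_of_subset_of_card_le hI.Psub (by simpa using hf)
    have hL : pvL n narcs = P := by
      apply Finset.Subset.antisymm
      · rw [hP]; exact pvL_subset_range n narcs
      · exact hI.PsubL
    simp [pvKahnLoop, hL]
  | succ fuel ih =>
    intro deg queue P hI hf
    cases hq : queue.getLast? with
    | none =>
      have hqe : queue = [] := List.getLast?_eq_none_iff.mp hq
      have hL : pvL n narcs = P := by
        apply Finset.Subset.antisymm
        · apply pvL_least
          intro v hv
          simp only [pvF, Finset.mem_filter, Finset.mem_range] at hv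
          by_contra hc
          have := (hI.qiff v hv.1 hc).mpr hv.2
          rw [hqe] at this
          simp at this
        · exact hI.PsubL
      simp [pvKahnLoop, hq, hL]
    | some node =>
      obtain ⟨q', hq'⟩ := List.getLast?_eq_some_iff.mp hq
      have hnodeq : node ∈ queue := by rw [hq']; simp
      have hnn : node < n := hI.qlt node hnodeq
      have hnP : node ∉ P := hI.qP node hnodeq
      have hall : ∀ u ∈ pvPd narcs node, u ∈ P := (hI.qiff node hnn hnP).mp hnodeq
      have hdrop : queue.dropLast = q' := by rw [hq']; simp
      have hq'nod : q'.Nodup ∧ node ∉ q' := by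
        have := hI.nod
        rw [hq'] at this
        simp [List.nodup_append] at this
        exact ⟨this.1, fun h => this.2 node h rfl⟩
      set P' := insert node P with hP'
      have hocc : adj.getD node [] = (narcs.filter (fun p => p.2 == node)).map (fun p => p.1) :=
        Hadj node hnn
      have hoccmem : ∀ x ∈ adj.getD node [], x < n ∧ x ∉ P' := by
        intro x hx
        rw [hocc] at hx
        obtain ⟨p, hp, hpx⟩ := List.mem_map.mp hx
        obtain ⟨hpn, hp2⟩ := List.mem_filter.mp hp
        have hax := Ha p hpn
        have hp2' : p.2 = node := by simpa using hp2
        have hxn : x < n := by rw [← hpx]; exact hax.1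
        have hnpd : node ∈ pvPd narcs x := by
          apply List.mem_map.mpr
          exact ⟨p, List.mem_filter.mpr ⟨hpn, by simp [hpx]⟩, hp2'⟩
        have hxP : x ∉ P := fun hxP => hnP (hI.Pcl x hxP node hnpd)
        have hxne : x ≠ node := by rw [← hpx, ← hp2']; exact hax.2.2
        exact ⟨hxn, by simp [hP', Finset.mem_insert, hxne, hxP]⟩
      have hcnt : ∀ v, (adj.getD node []).count v = (pvPd narcs v).count node := by
        intro v; rw [hocc]; exact pv_count_occ narcs node v
      have hSInv : pvSInv n narcs P' (adj.getD node []) deg q' := by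
        refine ⟨hI.len, hq'nod.1, ?_, ?_, ?_, ?_⟩
        · intro x hx; exact hI.qlt x (by rw [hq']; exact List.mem_append_left _ hx)
        · intro x hx
          have hxP := hI.qP x (by rw [hq']; exact List.mem_append_left _ hx)
          have hxne : x ≠ node := fun h => hq'nod.2 (h ▸ hx)
          simp [hP', Finset.mem_insert, hxne, hxP]
        · intro v hv
          rw [hI.dspec v hv, hcnt v, pv_filter_insert P node hnP (pvPd narcs v)]
          push_cast
          ring
        · intro v hv hvP'
          have hvne : v ≠ node := fun h => hvP' (h ▸ Finset.mem_insert_self node P)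
          have hvP : v ∉ P := fun h => hvP' (Finset.mem_insert_of_mem h)
          have hmem : v ∈ q' ↔ v ∈ queue := by
            rw [hq']; simp [hvne]
          rw [hmem, hI.qiff v hv hvP, hcnt v]
          constructor
          · intro h
            have hnode_nmem : node ∉ pvPd narcs v := fun hmem2 => hnP (h node hmem2)
            exact ⟨fun u hu => Finset.mem_insert_of_mem (h u hu),
              List.count_eq_zero.mpr hnode_nmem⟩
          · rintro ⟨h1, h2⟩
            intro u hu
            have hune : u ≠ node := fun he => by
              rw [he] at hu
              exact (List.count_eq_zero.mp h2) hu
            rcases Finset.mem_insert.mp (h1 u hu) with h | h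
            · exact absurd h hune
            · exact h
      have hres := pvFold_inv n narcs P' (adj.getD node []) deg q' hoccmem hSInv
      have hKI' : pvKInv n narcs (List.foldl pvStep (deg, q') (adj.getD node [])).1
          (List.foldl pvStep (deg, q') (adj.getD node [])).2 P' := by
        refine ⟨hres.len, hres.nod, hres.qlt, hres.qP, ?_, ?_, ?_, ?_, ?_⟩
        · intro v hv
          rcases Finset.mem_insert.mp hv with h | h
          · subst h; exact Finset.mem_range.mpr hnn
          · exact hI.Psub h
        · intro v hv
          rcases Finset.mem_insert.mp hv with h | h
          · subst h
            exact pvL_mem n narcs hnn (fun u hu => hI.PsubL (hall u hu))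
          · exact hI.PsubL h
        · intro v hv u hu
          rcases Finset.mem_insert.mp hv with h | h
          · subst h; exact Finset.mem_insert_of_mem (hall u hu)
          · exact Finset.mem_insert_of_mem (hI.Pcl v h u hu)
        · intro v hv
          have := hres.dspec v hv
          simpa using this
        · intro v hv hvP
          rw [hres.qiff v hv hvP]
          simp
      have hcard : P'.card = P.card + 1 := Finset.card_insert_of_notMem hnP
      have hrec := ih (List.foldl pvStep (deg, q') (adj.getD node [])).1
        (List.foldl pvStep (deg, q') (adj.getD node [])).2 P' hKI' (by omega)
      rw [hcard] at hrec
      show pvKahnLoop adj (fuel + 1) deg queue P.card = (pvL n narcs).card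
      rw [pvKahnLoop]
      simp only [hq, hdrop]
      exact hrec


-- The set of vertices currently marked ready.
def pvT (n : Nat) (r : List Bool) : Finset Nat :=
  (Finset.range n).filter (fun v => r.getD v false = true)

theorem pvPass_len (preds : List (List Nat)) :
    ∀ (l : List Nat) (s : List Bool × Bool),
      (l.foldl (pvPassF preds) s).1.length = s.1.length := by
  intro l
  induction l with
  | nil => intro s; rfl
  | cons x l' ih =>
    intro s
    rw [List.foldl_cons, ih]
    unfold pvPassF
    split
    · simp
    · rfl

theorem pvPass_mono (preds : List (List Nat)) :
    ∀ (l : List Nat) (s : List Bool × Bool) (v : Nat),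
      s.1.getD v false = true → (l.foldl (pvPassF preds) s).1.getD v false = true := by
  intro l
  induction l with
  | nil => intro s v h; exact h
  | cons x l' ih =>
    intro s v h
    rw [List.foldl_cons]
    apply ih
    unfold pvPassF
    split
    · by_cases hvx : x = v
      · subst hvx
        by_cases hlt : x < s.1.length
        · rw [pv_getD_set_self _ _ _ _ hlt]
        · rw [List.set_eq_of_length_le (by omega)]
          exact h
      · rw [pv_getD_set_ne _ _ _ _ _ hvx]
        exact h
    · exact h

theorem pvPass_flag (preds : List (List Nat)) :
    ∀ (l : List Nat) (s : List Bool × Bool),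
      s.2 = true → (l.foldl (pvPassF preds) s).2 = true := by
  intro l
  induction l with
  | nil => intro s h; exact h
  | cons x l' ih =>
    intro s h
    rw [List.foldl_cons]
    apply ih
    unfold pvPassF
    split
    · rfl
    · exact h

theorem pvPass_nofire (preds : List (List Nat)) {l : List Nat} {s : List Bool × Bool} {x : Nat}
    (h : (l.foldl (pvPassF preds) (pvPassF preds s x)).2 = false) :
    pvPassF preds s x = s ∧
      ¬((!(s.1.getD x false)) && (preds.getD x []).all (fun u => s.1.getD u false)) = true := by
  by_cases hc : ((!(s.1.getD x false)) && (preds.getD x []).all (fun u => s.1.getD u false)) = true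
  · exfalso
    have : (pvPassF preds s x).2 = true := by unfold pvPassF; rw [if_pos hc]
    have := pvPass_flag preds l _ this
    simp [this] at h
  · constructor
    · unfold pvPassF; rw [if_neg hc]
    · exact hc

theorem pvPass_nochange (preds : List (List Nat)) :
    ∀ (l : List Nat) (s : List Bool × Bool),
      (l.foldl (pvPassF preds) s).2 = false →
      (l.foldl (pvPassF preds) s).1 = s.1 ∧ s.2 = false ∧
      ∀ x ∈ l,
        ¬((!(s.1.getD x false)) && (preds.getD x []).all (fun u => s.1.getD u false)) = true := by
  intro l
  induction l with
  | nil =>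
    intro s h
    exact ⟨rfl, h, by intro x hx; cases hx⟩
  | cons x l' ih =>
    intro s h
    rw [List.foldl_cons] at h ⊢
    obtain ⟨hfix, hcond⟩ := pvPass_nofire preds h
    rw [hfix] at h ⊢
    obtain ⟨h1, h2, h3⟩ := ih s h
    refine ⟨h1, h2, ?_⟩
    intro y hy
    rcases List.mem_cons.mp hy with rfl | hy'
    · exact hcond
    · exact h3 y hy'

theorem pvPass_sound (n : Nat) (narcs : List (Nat × Nat)) (preds : List (List Nat))
    (Hpreds : ∀ v, v < n → preds.getD v [] = pvPd narcs v)
    (Hpd : ∀ v u, u ∈ pvPd narcs v → u < n) :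
    ∀ (l : List Nat) (s : List Bool × Bool),
      (∀ v ∈ l, v < n) → s.1.length = n → pvT n s.1 ⊆ pvL n narcs →
      pvT n (l.foldl (pvPassF preds) s).1 ⊆ pvL n narcs := by
  intro l
  induction l with
  | nil => intro s _ _ h; exact h
  | cons x l' ih =>
    intro s hl hlen hsub
    rw [List.foldl_cons]
    have hxn : x < n := hl x (List.mem_cons_self)
    apply ih _ (fun v hv => hl v (List.mem_cons_of_mem _ hv))
    · unfold pvPassF
      split
      · simpa using hlen
      · exact hlen
    · unfold pvPassF
      split
      · rename_i hc
        simp only [Bool.and_eq_true, Bool.not_eq_eq_eq_not, Bool.not_true,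
          List.all_eq_true] at hc
        intro v hv
        simp only [pvT, Finset.mem_filter, Finset.mem_range] at hv
        obtain ⟨hvn, hvt⟩ := hv
        by_cases hvx : v = x
        · subst hvx
          apply pvL_mem n narcs hvn
          intro u hu
          have hu' := hc.2 u (by rw [Hpreds v hvn]; exact hu)
          have hun : u < n := Hpd v u hu
          apply hsub
          simp only [pvT, Finset.mem_filter, Finset.mem_range]
          exact ⟨hun, hu'⟩
        · rw [pv_getD_set_ne _ _ _ _ _ (fun h => hvx h.symm)] at hvt
          apply hsub
          simp only [pvT, Finset.mem_filter, Finset.mem_range]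
          exact ⟨hvn, hvt⟩
      · exact hsub

theorem pvPass_grew (n : Nat) (preds : List (List Nat)) :
    ∀ (l : List Nat) (s : List Bool × Bool),
      (∀ v ∈ l, v < n) → s.1.length = n →
      (l.foldl (pvPassF preds) s).2 = true → s.2 = false →
      ∃ v, v ∈ pvT n (l.foldl (pvPassF preds) s).1 ∧ v ∉ pvT n s.1 := by
  intro l
  induction l with
  | nil =>
    intro s _ _ ht hf
    rw [List.foldl_nil] at ht
    rw [ht] at hf
    cases hf
  | cons x l' ih =>
    intro s hl hlen ht hf
    rw [List.foldl_cons] at ht ⊢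
    have hxn : x < n := hl x (List.mem_cons_self)
    by_cases hc : ((!(s.1.getD x false)) && (preds.getD x []).all (fun u => s.1.getD u false)) = true
    · have hfx : pvPassF preds s x = (s.1.set x true, true) := by
        unfold pvPassF; rw [if_pos hc]
      refine ⟨x, ?_, ?_⟩
      · have hset : (s.1.set x true).getD x false = true :=
          pv_getD_set_self _ _ _ _ (by rw [hlen]; exact hxn)
        have := pvPass_mono preds l' (pvPassF preds s x) x (by rw [hfx]; exact hset)
        simp only [pvT, Finset.mem_filter, Finset.mem_range]
        exact ⟨hxn, this⟩
      · simp only [pvT, Finset.mem_filter, Finset.mem_range]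
        rintro ⟨-, hxt⟩
        simp only [Bool.and_eq_true] at hc
        rw [hxt] at hc
        simp at hc
    · have hfx : pvPassF preds s x = s := by unfold pvPassF; rw [if_neg hc]
      rw [hfx] at ht ⊢
      exact ih s (fun v hv => hl v (List.mem_cons_of_mem _ hv)) hlen ht hf


theorem pvRelax_spec (n : Nat) (narcs : List (Nat × Nat)) (preds : List (List Nat))
    (Hpreds : ∀ v, v < n → preds.getD v [] = pvPd narcs v)
    (Hpd : ∀ v u, u ∈ pvPd narcs v → u < n) :
    ∀ (k : Nat) (r : List Bool), r.length = n → pvT n r ⊆ pvL n narcs →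
      n ≤ k + (pvT n r).card →
      pvT n (pvRelax preds n k r) = pvL n narcs := by
  intro k
  induction k with
  | zero =>
    intro r hlen hsub hcard
    have hTsub : pvT n r ⊆ Finset.range n := Finset.filter_subset _ _
    have hT : pvT n r = Finset.range n :=
      Finset.eq_of_subset_of_card_le hTsub (by simpa using hcard)
    have : pvT n r = pvL n narcs := by
      apply Finset.Subset.antisymm hsub
      rw [hT]
      exact pvL_subset_range n narcs
    rw [pvRelax]
    exact this
  | succ k ih =>
    intro r hlen hsub hcard
    rw [pvRelax]
    have hrange : ∀ v ∈ List.range n, v < n := fun v hv => List.mem_range.mp hv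
    cases hp : ((List.range n).foldl (pvPassF preds) (r, false)).2 with
    | false =>
      rw [if_neg (by simp)]
      obtain ⟨h1, -, h3⟩ := pvPass_nochange preds (List.range n) (r, false) hp
      rw [h1]
      apply Finset.Subset.antisymm hsub
      apply pvL_least
      intro v hv
      simp only [pvF, Finset.mem_filter, Finset.mem_range] at hv
      obtain ⟨hvn, hvp⟩ := hv
      by_contra hc
      have hvf : r.getD v false = false := by
        simp only [pvT, Finset.mem_filter, Finset.mem_range] at hc
        cases hb : r.getD v false with
        | false => rfl
        | true => exact absurd ⟨hvn, hb⟩ hc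
      apply h3 v (List.mem_range.mpr hvn)
      simp only [hvf, Bool.not_false, Bool.true_and, List.all_eq_true]
      intro u hu
      rw [Hpreds v hvn] at hu
      have hm := hvp u hu
      simp only [pvT, Finset.mem_filter] at hm
      exact hm.2
    | true =>
      rw [if_pos rfl]
      have hlen' := pvPass_len preds (List.range n) (r, false)
      have hsub' := pvPass_sound n narcs preds Hpreds Hpd (List.range n) (r, false)
        hrange hlen hsub
      have hmono : pvT n r ⊆ pvT n ((List.range n).foldl (pvPassF preds) (r, false)).1 := by
        intro v hv
        simp only [pvT, Finset.mem_filter, Finset.mem_range] at hv ⊢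
        exact ⟨hv.1, pvPass_mono preds (List.range n) (r, false) v hv.2⟩
      obtain ⟨w, hw1, hw2⟩ := pvPass_grew n preds (List.range n) (r, false) hrange hlen hp rfl
      have hss : pvT n r ⊂ pvT n ((List.range n).foldl (pvPassF preds) (r, false)).1 :=
        ⟨hmono, fun hback => hw2 (hback hw1)⟩
      have hlt := Finset.card_lt_card hss
      exact ih _ (by rw [hlen']; exact hlen) hsub' (by omega)

theorem pv_getD_replicate {α : Type} (n : Nat) (c : α) (v : Nat) :
    (List.replicate n c).getD v c = c := by
  by_cases h : v < n
  · rw [List.getD_eq_getElem _ _ (by simpa using h)]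
    simp
  · rw [List.getD_eq_default _ _ (by simpa using h)]

theorem pv_all_getD (r : List Bool) :
    (r.all (fun b => b) = true) ↔ ∀ i, i < r.length → r.getD i false = true := by
  rw [List.all_eq_true]
  constructor
  · intro h i hi
    rw [List.getD_eq_getElem _ _ hi]
    exact h _ (List.getElem_mem hi)
  · intro h b hb
    obtain ⟨i, hi, rfl⟩ := List.mem_iff_getElem.mp hb
    have := h i hi
    rw [List.getD_eq_getElem _ _ hi] at this
    exact this

theorem pvRelax_len (preds : List (List Nat)) (n : Nat) :
    ∀ (k : Nat) (r : List Bool), (pvRelax preds n k r).length = r.length := by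
  intro k
  induction k with
  | zero => intro r; rfl
  | succ k ih =>
    intro r
    rw [pvRelax]
    cases hp : ((List.range n).foldl (pvPassF preds) (r, false)).2 with
    | false =>
      rw [if_neg (by simp)]
      exact pvPass_len preds (List.range n) (r, false)
    | true =>
      rw [if_pos rfl, ih]
      exact pvPass_len preds (List.range n) (r, false)

-- The valid-instance case: Kahn's count (A) agrees with the relaxation (B).
theorem pv_core (nv : Int) (arcs : List (Int × Int)) (hnv : 0 ≤ nv)
    (harcs : ∀ p ∈ arcs, 0 ≤ p.1 ∧ p.1 < nv ∧ 0 ≤ p.2 ∧ p.2 < nv ∧ p.1 ≠ p.2) :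
    (pvKahnLoop
        (List.foldl (fun a p => pvPush a p.2 p.1) (List.replicate nv.toNat [])
          (arcs.map (fun p => (p.1.toNat, p.2.toNat))))
        (nv.toNat + 1)
        (List.foldl (fun d p => pvIncr d p.1) (List.replicate nv.toNat 0)
          (arcs.map (fun p => (p.1.toNat, p.2.toNat))))
        ((List.range nv.toNat).filter (fun v =>
          (List.foldl (fun d p => pvIncr d p.1) (List.replicate nv.toNat 0)
            (arcs.map (fun p => (p.1.toNat, p.2.toNat)))).getD v 0 == 0))
        0 == nv.toNat)
      = (pvRelax
          (List.foldl (fun a p => pvPush a p.1 p.2) (List.replicate nv.toNat [])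
            (arcs.map (fun p => (p.1.toNat, p.2.toNat))))
          nv.toNat nv.toNat (List.replicate nv.toNat false)).all (fun b => b) := by
  set n := nv.toNat with hn
  set narcs := arcs.map (fun p => (p.1.toNat, p.2.toNat)) with hnarcs
  have Ha : ∀ p ∈ narcs, p.1 < n ∧ p.2 < n ∧ p.1 ≠ p.2 := by
    intro q hq
    rw [hnarcs] at hq
    obtain ⟨p, hp, rfl⟩ := List.mem_map.mp hq
    obtain ⟨h1, h2, h3, h4, h5⟩ := harcs p hp
    refine ⟨by omega, by omega, by omega⟩
  have Hpd : ∀ v u, u ∈ pvPd narcs v → u < n := by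
    intro v u hu
    obtain ⟨p, hp, rfl⟩ := List.mem_map.mp hu
    exact (Ha p (List.mem_filter.mp hp).1).2.1
  -- deg
  have hdegB := pvIncr_build narcs (List.replicate n 0)
    (fun p hp => by rw [List.length_replicate]; exact (Ha p hp).1)
  set deg := List.foldl (fun d p => pvIncr d p.1) (List.replicate n 0) narcs with hdeg
  have hdlen : deg.length = n := by rw [hdeg, hdegB.1, List.length_replicate]
  have hdspec : ∀ v, deg.getD v 0 = ((narcs.filter (fun p => p.1 == v)).length : Int) := by
    intro v
    rw [hdeg, hdegB.2 v, pv_getD_replicate]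
    ring
  have hpdlen : ∀ v, (pvPd narcs v).length = (narcs.filter (fun p => p.1 == v)).length := by
    intro v; rw [pvPd, List.length_map]
  have hfilterempty : ∀ (m : List Nat),
      m.filter (fun u => decide (u ∉ (∅ : Finset Nat))) = m := by
    intro m
    apply List.filter_eq_self.mpr
    intro a _
    simp
  -- adj
  have hadjB := pvPush_build (fun p => p.2) (fun p => p.1) narcs (List.replicate n [])
    (fun p hp => by rw [List.length_replicate]; exact (Ha p hp).2.1)
  set adj := List.foldl (fun a p => pvPush a p.2 p.1) (List.replicate n []) narcs with hadj
  have hAdj : ∀ u, u < n →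
      adj.getD u [] = (narcs.filter (fun p => p.2 == u)).map (fun p => p.1) := by
    intro u _
    have h1 : adj.getD u []
        = (List.replicate n ([] : List Nat)).getD u []
          ++ (narcs.filter (fun p => p.2 == u)).map (fun p => p.1) := hadjB.2 u
    rw [h1, pv_getD_replicate, List.nil_append]
  -- preds
  have hpredsB := pvPush_build (fun p => p.1) (fun p => p.2) narcs (List.replicate n [])
    (fun p hp => by rw [List.length_replicate]; exact (Ha p hp).1)
  set preds := List.foldl (fun a p => pvPush a p.1 p.2) (List.replicate n []) narcs with hpreds
  have Hpreds : ∀ v, v < n → preds.getD v [] = pvPd narcs v := by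
    intro v _
    have h1 : preds.getD v []
        = (List.replicate n ([] : List Nat)).getD v []
          ++ (narcs.filter (fun p => p.1 == v)).map (fun p => p.2) := hpredsB.2 v
    rw [h1, pv_getD_replicate, List.nil_append, pvPd]
  -- initial Kahn invariant
  set queue := (List.range n).filter (fun v => deg.getD v 0 == 0) with hqueue
  have hKI : pvKInv n narcs deg queue ∅ := by
    refine ⟨hdlen, ?_, ?_, ?_, ?_, ?_, ?_, ?_, ?_⟩
    · exact List.Nodup.filter _ (List.nodup_range)
    · intro x hx
      rw [hqueue] at hx
      exact List.mem_range.mp (List.mem_filter.mp hx).1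
    · intro x _; exact Finset.notMem_empty x
    · exact Finset.empty_subset _
    · exact Finset.empty_subset _
    · intro v hv; exact absurd hv (Finset.notMem_empty v)
    · intro v _
      rw [hdspec v, hfilterempty, hpdlen v]
    · intro v hv _
      rw [hqueue]
      constructor
      · intro hmem
        have h2 := (List.mem_filter.mp hmem).2
        have h3 : deg.getD v 0 = 0 := by simpa using h2
        rw [hdspec v] at h3
        have h4 : (narcs.filter (fun p => p.1 == v)).length = 0 := by omega
        intro u hu
        exfalso
        obtain ⟨p, hp, rfl⟩ := List.mem_map.mp hu
        have := List.length_pos_of_mem hp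
        omega
      · intro hall
        apply List.mem_filter.mpr
        refine ⟨List.mem_range.mpr hv, ?_⟩
        have h3 : pvPd narcs v = [] := by
          cases he : pvPd narcs v with
          | nil => rfl
          | cons a l =>
            exfalso
            exact Finset.notMem_empty a (hall a (by rw [he]; exact List.mem_cons_self))
        have h4 : (narcs.filter (fun p => p.1 == v)).length = 0 := by
          rw [← hpdlen v, h3]
          rfl
        have h5 : deg.getD v 0 = 0 := by
          rw [hdspec v, h4]
          rfl
        simpa using h5
  have hKahn : pvKahnLoop adj (n + 1) deg queue 0 = (pvL n narcs).card := by
    have := pvKahn_main n narcs adj Ha hAdj (n + 1) deg queue ∅ hKI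
      (by simp)
    simpa using this
  -- B side
  have hT0 : pvT n (List.replicate n false) = ∅ := by
    apply Finset.filter_eq_empty_iff.mpr
    intro v _
    rw [pv_getD_replicate]
    simp
  have hRelax : pvT n (pvRelax preds n n (List.replicate n false)) = pvL n narcs := by
    apply pvRelax_spec n narcs preds Hpreds Hpd n (List.replicate n false)
      (List.length_replicate) (by rw [hT0]; exact Finset.empty_subset _)
    rw [hT0]
    simp
  have hRlen : (pvRelax preds n n (List.replicate n false)).length = n := by
    rw [pvRelax_len, List.length_replicate]
  set R := pvRelax preds n n (List.replicate n false) with hR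
  have hiff1 : (pvKahnLoop adj (n + 1) deg queue 0 == n) = true ↔ (pvL n narcs).card = n := by
    rw [hKahn]
    simp
  have hiff2 : (R.all (fun b => b) = true) ↔ (pvL n narcs).card = n := by
    rw [pv_all_getD, hRlen]
    constructor
    · intro h
      have : Finset.range n ⊆ pvT n R := by
        intro v hv
        exact Finset.mem_filter.mpr ⟨hv, h v (Finset.mem_range.mp hv)⟩
      have hLr : pvL n narcs = Finset.range n := by
        rw [← hRelax]
        exact Finset.Subset.antisymm (Finset.filter_subset _ _) this
      rw [hLr]
      exact Finset.card_range n
    · intro h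
      have hLr : pvL n narcs = Finset.range n :=
        Finset.eq_of_subset_of_card_le (pvL_subset_range n narcs)
          (by rw [h]; simp)
      intro i hi
      have : i ∈ pvT n R := by
        rw [hRelax, hLr]
        exact Finset.mem_range.mpr hi
      exact (Finset.mem_filter.mp this).2
  cases hb : (pvKahnLoop adj (n + 1) deg queue 0 == n) with
  | true => exact (hiff2.mpr (hiff1.mp hb)).symm
  | false =>
    cases hb2 : (R.all (fun b => b)) with
    | true =>
      exfalso
      have := hiff1.mpr (hiff2.mp hb2)
      rw [hb] at this
      cases this
    | false => rfl
-- ===== VERDICT (by name: the statement is the Claim_ definition above) =====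
theorem is_valid_target_spec : Claim_equal_is_valid_target := by
  intro num_vertices arcs bound _
  unfold Spec_is_valid_target
  unfold is_valid_target is_valid_target_alt
  by_cases h1 : (decide (num_vertices < 0) || decide (bound < 0)) = true
  · rw [if_pos h1, if_pos h1]
  · rw [if_neg h1, if_neg h1]
    by_cases h2 : (arcs.any (pvBadArc num_vertices)) = true
    · rw [if_pos h2, if_pos h2]
    · rw [if_neg h2, if_neg h2]
      have hnv : 0 ≤ num_vertices := by
        simp at h1
        omega
      have harcs : ∀ p ∈ arcs, 0 ≤ p.1 ∧ p.1 < num_vertices ∧ 0 ≤ p.2 ∧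
          p.2 < num_vertices ∧ p.1 ≠ p.2 := by
        intro p hp
        have h3 : ¬ pvBadArc num_vertices p = true := by
          intro hb
          exact h2 (List.any_eq_true.mpr ⟨p, hp, hb⟩)
        simp [pvBadArc] at h3
        omega
      exact pv_core num_vertices arcs hnv harcs
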